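-- pv_equiv track=rewrite | github.com/AlpAcA0072/Leetcode_Intern | OriginalProject/src/temp/xiecheng/秋招/xiecheng04.py | count
-- ===== SOURCE A (Python) =====
-- def count(n: int, k: int, sum_limit: int, arr: list):
--     count = 0
--
--     for i in range(n):
--         start = max(0, i - k + 1)
--         curr_sum = sum(arr[start : i + 1])
--         if curr_sum > sum_limit:
--             excess = curr_sum - sum_limit
--             arr[i] -= excess
--             count += excess
--
--         if arr[i] < 0:
--             count += abs(arr[i])
--             arr[i] = 0
--
--     return count
-- ===== SOURCE B (Python) =====
-- def count(n: int, k: int, sum_limit: int, arr: list):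
--     # O(n): prefix sums of the final (clamped) values replace the O(k) window re-sum.
--     pref = [0]
--     total = 0
--     for i in range(n):
--         start = max(0, i - k + 1)
--         if start <= i:
--             curr = pref[i] - pref[start] + arr[i]
--         else:
--             curr = 0
--         excess = curr - sum_limit if curr > sum_limit else 0
--         v = arr[i] - excess
--         total += excess
--         if v < 0:
--             total += -v
--             v = 0
--         arr[i] = v
--         pref.append(pref[i] + v)
--     return total
-- ===== Notes on version B (the rewrite author's own statement) =====
-- stated objective: faster
-- what changed: B keeps a running list of prefix sums of the already-finalised values and obtains each window sum as a difference of two prefix sums, instead of A's re-summing of the k-element slice on every iteration.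
import Mathlib
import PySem

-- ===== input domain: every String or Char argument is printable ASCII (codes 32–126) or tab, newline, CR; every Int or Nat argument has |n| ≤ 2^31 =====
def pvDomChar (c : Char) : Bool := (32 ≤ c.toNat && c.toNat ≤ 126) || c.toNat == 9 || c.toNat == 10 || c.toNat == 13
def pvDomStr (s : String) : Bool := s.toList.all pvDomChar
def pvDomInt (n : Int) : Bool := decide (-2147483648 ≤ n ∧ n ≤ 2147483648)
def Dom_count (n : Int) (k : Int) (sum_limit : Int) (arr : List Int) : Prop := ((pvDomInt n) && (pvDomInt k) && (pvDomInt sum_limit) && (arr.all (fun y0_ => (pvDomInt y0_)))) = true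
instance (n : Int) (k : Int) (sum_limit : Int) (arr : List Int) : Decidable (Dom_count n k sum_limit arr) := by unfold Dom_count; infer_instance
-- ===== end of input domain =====

-- B replaces A's O(k) per-iteration window re-sum by prefix sums of the already-final values (O(n+k) total);
-- both Pythons mutate `arr` in place identically — the equivalence proved here is about the return value.

-- ===== PORT A =====
-- one iteration of A's loop body; state = (arr, count)
def stepA (k : Int) (sum_limit : Int) (st : List Int × Int) (i : Int) : List Int × Int :=
  let a := st.1
  let c := st.2
  let start := max 0 (i - k + 1)
  let curr_sum := (PySem.List.slice a (some start) (some (i + 1))).sum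
  let st1 : List Int × Int :=
    if curr_sum > sum_limit then
      let excess := curr_sum - sum_limit
      (PySem.List.pySetD a i (PySem.List.pyGetD a i 0 - excess), c + excess)
    else (a, c)
  if PySem.List.pyGetD st1.1 i 0 < 0 then
    (PySem.List.pySetD st1.1 i 0, st1.2 + |PySem.List.pyGetD st1.1 i 0|)
  else st1

def count (n : Int) (k : Int) (sum_limit : Int) (arr : List Int) : Int :=
  ((PySem.List.pyRange 0 n 1).foldl (stepA k sum_limit) (arr, 0)).2

-- ===== PORT B =====
-- one iteration of B's loop body; state = (pref, arr, total)
def stepB (k : Int) (sum_limit : Int) (st : List Int × List Int × Int) (i : Int) : List Int × List Int × Int :=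
  let pref := st.1
  let a := st.2.1
  let total := st.2.2
  let start := max 0 (i - k + 1)
  let curr :=
    if start ≤ i then
      PySem.List.pyGetD pref i 0 - PySem.List.pyGetD pref start 0 + PySem.List.pyGetD a i 0
    else 0
  let excess := if curr > sum_limit then curr - sum_limit else 0
  let v := PySem.List.pyGetD a i 0 - excess
  let total := total + excess
  let tv : Int × Int := if v < 0 then (total + (-v), 0) else (total, v)
  (pref ++ [PySem.List.pyGetD pref i 0 + tv.2], PySem.List.pySetD a i tv.2, tv.1)

def count_alt (n : Int) (k : Int) (sum_limit : Int) (arr : List Int) : Int :=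
  ((PySem.List.pyRange 0 n 1).foldl (stepB k sum_limit) ([0], arr, 0)).2.2

-- ===== PRECONDITION & SPEC =====
-- Pre_ excludes exactly n > len(arr), where Python A (and B alike) raises IndexError at arr[i].
def Pre_count (n : Int) (k : Int) (sum_limit : Int) (arr : List Int) : Prop :=
  n ≤ (arr.length : Int)
instance (n : Int) (k : Int) (sum_limit : Int) (arr : List Int) : Decidable (Pre_count n k sum_limit arr) := by unfold Pre_count; infer_instance

def pvWitness_count : Int × Int × Int × List Int := (4, 2, 5, [3, 4, -2, 9])

def Spec_count (n : Int) (k : Int) (sum_limit : Int) (arr : List Int) (out : Int) : Prop := out = count_alt n k sum_limit arr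
instance (n : Int) (k : Int) (sum_limit : Int) (arr : List Int) (out : Int) : Decidable (Spec_count n k sum_limit arr out) := by unfold Spec_count; infer_instance

-- ===== CLAIM (what is proved, stated in full; the proofs are below) =====
def Claim_equal_count : Prop := ∀ (n : Int) (k : Int) (sum_limit : Int) (arr : List Int), Dom_count n k sum_limit arr → Pre_count n k sum_limit arr → Spec_count n k sum_limit arr (count n k sum_limit arr)

-- ===== LEMMAS AND PROOFS =====

-- a take below an index is unchanged by a set at that index
lemma take_set_of_le (a : List Int) (m j : Nat) (v : Int) (h : j ≤ m) :
    (a.set m v).take j = a.take j := by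
  apply List.ext_getElem
  · simp
  · intro i h1 h2
    rw [List.length_take] at h1
    simp only [List.getElem_take, List.getElem_set]
    rw [if_neg (by omega)]

-- sum of a contiguous segment as a difference of prefix sums
lemma sum_drop_take (a : List Int) (s e : Nat) (h : s ≤ e) :
    (((a.drop s).take (e - s)).sum : Int) = (a.take e).sum - (a.take s).sum := by
  have : a.take e = a.take s ++ (a.drop s).take (e - s) := by
    have he : e = s + (e - s) := by omega
    rw [he, List.take_add]
    simp
  rw [this, List.sum_append]
  ring

-- indexing into the pref list B maintains yields a prefix sum
lemma pref_get (a : List Int) (m j : Nat) (hj : j ≤ m) :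
    PySem.List.pyGetD ((List.range (m + 1)).map (fun j => (a.take j).sum)) (j : Int) 0
      = (a.take j).sum := by
  rw [PySem.List.pyGetD_natCast]
  simp [List.getD, Nat.lt_succ_of_le hj]

lemma take_succ_set (a : List Int) (m : Nat) (w : Int) (hm : m < a.length) :
    ((a.set m w).take (m+1)).sum = (a.take m).sum + w := by
  rw [List.take_add_one, take_set_of_le a m m w le_rfl]
  simp [hm]

-- one iteration of B mirrors one iteration of A
lemma step_match (k sum_limit : Int) (a : List Int) (c : Int) (m : Nat) (hm : m < a.length) :
    stepB k sum_limit ((List.range (m+1)).map (fun j => (a.take j).sum), a, c) (m : Int)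
      = ((List.range (m+2)).map (fun j => (((stepA k sum_limit (a,c) (m:Int)).1).take j).sum),
         (stepA k sum_limit (a,c) (m:Int)).1,
         (stepA k sum_limit (a,c) (m:Int)).2)
    ∧ (stepA k sum_limit (a,c) (m:Int)).1.length = a.length := by
  -- name the shared quantities
  set start : Int := max 0 ((m:Int) - k + 1) with hstart
  have hs0 : 0 ≤ start := le_max_left _ _
  set s : Nat := start.toNat with hsdef
  have hscast : (s : Int) = start := Int.toNat_of_nonneg hs0
  have hsum_take : (a.take (m+1)).sum = (a.take m).sum + a[m] := by
    rw [List.take_add_one, List.getElem?_eq_getElem hm]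
    rw [Option.toList_some, List.sum_append, List.sum_cons, List.sum_nil]
    ring
  -- the two currents agree
  have hcurr : (PySem.List.slice a (some start) (some ((m:Int) + 1))).sum
      = (if start ≤ (m:Int) then
          PySem.List.pyGetD ((List.range (m+1)).map (fun j => (a.take j).sum)) (m:Int) 0
          - PySem.List.pyGetD ((List.range (m+1)).map (fun j => (a.take j).sum)) start 0
          + PySem.List.pyGetD a (m:Int) 0
        else 0) := by
    rw [PySem.List.slice_toNat a hs0 (by positivity)]
    by_cases hle : start ≤ (m:Int)
    · have hsm : s ≤ m := by omega
      have h1 : ((m:Int)+1).toNat = m + 1 := by omega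
      rw [if_pos hle, h1, sum_drop_take a s (m+1) (by omega)]
      rw [← hscast, pref_get a m m le_rfl, pref_get a m s hsm,
          PySem.List.pyGetD_natCast]
      rw [hsum_take]
      simp [List.getD, List.getElem?_eq_getElem hm]
      ring
    · have hsm : m + 1 ≤ s := by omega
      rw [if_neg hle]
      have h2 : ((m:Int)+1).toNat - start.toNat = 0 := by omega
      rw [h2]
      simp
  have hget : PySem.List.pyGetD a (m:Int) 0 = a[m] := by
    rw [PySem.List.pyGetD_natCast]; simp [List.getD, List.getElem?_eq_getElem hm]
  -- unfold both steps
  simp only [stepA, stepB]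
  rw [← hcurr]
  set curr := (PySem.List.slice a (some start) (some ((m:Int) + 1))).sum with hc
  set excess : Int := if curr > sum_limit then curr - sum_limit else 0 with he
  set v : Int := a[m] - excess with hv
  -- A's state after the first branch
  have hA1 : (if curr > sum_limit then
        (PySem.List.pySetD a (m:Int) (PySem.List.pyGetD a (m:Int) 0 - (curr - sum_limit)), c + (curr - sum_limit))
      else (a, c)) = (a.set m v, c + excess) := by
    by_cases h : curr > sum_limit
    · rw [if_pos h, hget, PySem.List.pySetD_natCast]
      simp [he, hv, if_pos h]
    · rw [if_neg h]
      simp only [he, hv, if_neg h]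
      simp [List.set_getElem_self hm]
  rw [hA1]
  have hgetv : PySem.List.pyGetD (a.set m v) (m:Int) 0 = v := by
    rw [PySem.List.pyGetD_natCast]
    simp [List.getD, hm]
  dsimp only
  rw [hgetv, show PySem.List.pyGetD a ((m:Nat):Int) 0 - excess = v from by rw [hget]]
  have hprefget : PySem.List.pyGetD ((List.range (m+1)).map (fun j => (a.take j).sum)) ((m:Nat):Int) 0 = (a.take m).sum :=
    pref_get a m m le_rfl
  -- appending the new prefix sum re-characterises pref for the updated list
  have hpref : ∀ w : Int, ((List.range (m+1)).map (fun j => (a.take j).sum)) ++ [(a.take m).sum + w]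
      = (List.range (m+2)).map fun j => ((a.set m w).take j).sum := by
    intro w
    conv_rhs => rw [show m + 2 = (m+1)+1 from rfl, List.range_succ]
    rw [List.map_append]
    congr 1
    · apply List.map_congr_left
      intro j hj
      rw [take_set_of_le a m j w (by simpa using Nat.lt_succ_iff.mp (List.mem_range.mp hj))]
    · simp [take_succ_set a m w hm]
  by_cases hvn : v < 0
  · rw [if_pos hvn, if_pos hvn]
    dsimp only
    simp only [PySem.List.pySetD_natCast, List.set_set]
    refine ⟨Prod.ext ?_ (Prod.ext (by simp) (by simp [abs_of_neg hvn])), by simp⟩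
    simpa [hprefget] using hpref 0
  · rw [if_neg hvn, if_neg hvn]
    dsimp only
    simp only [PySem.List.pySetD_natCast]
    refine ⟨Prod.ext ?_ (Prod.ext (by simp) (by simp)), by simp⟩
    simpa [hprefget] using hpref v

-- loop invariant: after m iterations B's state is (pref of A's list, A's list, A's count)
lemma loop_inv (k sum_limit : Int) (arr : List Int) (m : Nat) (hm : m ≤ arr.length) :
    (PySem.List.pyRange 0 (m:Int) 1).foldl (stepB k sum_limit) ([0], arr, 0)
      = ((List.range (m+1)).map
          (fun j => ((((PySem.List.pyRange 0 (m:Int) 1).foldl (stepA k sum_limit) (arr, 0)).1).take j).sum),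
         ((PySem.List.pyRange 0 (m:Int) 1).foldl (stepA k sum_limit) (arr, 0)).1,
         ((PySem.List.pyRange 0 (m:Int) 1).foldl (stepA k sum_limit) (arr, 0)).2)
    ∧ ((PySem.List.pyRange 0 (m:Int) 1).foldl (stepA k sum_limit) (arr, 0)).1.length = arr.length := by
  induction m with
  | zero =>
      simp [PySem.List.pyRange_one_eq_nil (by omega : (0:Int) ≤ 0)]
  | succ m ih =>
      have hm' : m ≤ arr.length := by omega
      obtain ⟨ihB, ihL⟩ := ih hm'
      have hsplit : PySem.List.pyRange 0 ((m+1 : Nat) : Int) 1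
          = PySem.List.pyRange 0 (m:Int) 1 ++ [(m:Int)] := by
        push_cast
        exact PySem.List.pyRange_one_succ_right (by positivity)
      rw [hsplit, List.foldl_append, List.foldl_append, ihB]
      simp only [List.foldl_cons, List.foldl_nil]
      have hmlt : m < ((PySem.List.pyRange 0 (m:Int) 1).foldl (stepA k sum_limit) (arr, 0)).1.length := by
        omega
      obtain ⟨h1, h2⟩ := step_match k sum_limit
        ((PySem.List.pyRange 0 (m:Int) 1).foldl (stepA k sum_limit) (arr, 0)).1
        ((PySem.List.pyRange 0 (m:Int) 1).foldl (stepA k sum_limit) (arr, 0)).2 m hmlt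
      constructor
      · rw [h1]
      · rw [h2]; exact ihL

-- ===== VERDICT (by name: the statement is the Claim_ definition above) =====
theorem count_spec : Claim_equal_count := by
  intro n k sum_limit arr _ hpre
  unfold Spec_count count count_alt
  by_cases hn : n ≤ 0
  · rw [PySem.List.pyRange_one_eq_nil hn]
    simp
  · have h1 : n = ((n.toNat : Nat) : Int) := by omega
    have hm : n.toNat ≤ arr.length := by
      unfold Pre_count at hpre; omega
    rw [h1]
    obtain ⟨hB, -⟩ := loop_inv k sum_limit arr n.toNat hm
    rw [hB]
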